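-- pv_equiv track=rewrite | github.com/Roblox/FAI-RL | trainers/rewards/subjective_rewards.py | _detect_evaluation_criterion
-- ===== SOURCE A (Python) =====
-- CRITERIA_HUMOR_PLAYFULNESS = """Humor & Playfulness:
-- - **Light-heartedness**: Cheerful, upbeat tone that avoids being overly serious
-- - **Wit**: Clever wordplay, amusing observations, or entertaining delivery
-- - **Fun-loving nature**: Enthusiasm for enjoyable activities and playful interactions
-- - **Personality consistency**: Humor that feels authentic to the character, not forced"""
--
-- CRITERIA_CREATIVITY = """Creativity and Imaginative Expression:
-- - **Original Ideas:** Novel concepts, unexpected connections, or fresh perspectives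
-- - **Vivid Imagery:** Rich, sensory language that creates immersive mental pictures
-- - **Character Voice:** Distinctive, authentic expression that goes beyond generic responses
-- - **Imaginative Details:** Creative elements, metaphors, or unexpected but fitting touches
-- - **Narrative Flair:** Unique storytelling techniques, creative structure, or engaging presentation
-- - **Reader Engagement:** Captivating content that surprises and delights"""
--
-- CRITERIA_PERSONA_CONSISTENCY = """Persona Consistency:
-- - **Character Voice:** Distinctive speaking style, vocabulary, and expression patterns
-- - **Personality Traits:** Core behavioral characteristics and emotional tendencies
-- - **Motivations:** Actions and responses aligned with character goals/background
-- - **Tone Consistency:** Maintained emotional register throughout the response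
-- - **Behavioral Authenticity:** Responses feel natural for this specific character"""
--
-- def _detect_evaluation_criterion(prompt: str) -> str:
--     """
--     Detect which evaluation criterion to use based on the prompt content.
--
--     Args:
--         prompt: The original prompt text
--
--     Returns:
--         The appropriate criteria string for evaluation
--     """
--     prompt_lower = prompt.lower()
--
--     # Keywords for humor & playfulness
--     humor_keywords = [
--         'Humor & Playfulness'
--     ]
--
--     # Keywords for creativity
--     creativity_keywords = [
--         'Creativity and Imaginative Expression'
--     ]
--
--     # Keywords for persona consistency
--     persona_keywords = [
--         'Persona Consistency'
--     ]
--
--     # Check if prompt contains one of the criterion phrases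
--     if any(kw in prompt_lower for kw in humor_keywords):
--         return CRITERIA_HUMOR_PLAYFULNESS
--     elif any(kw in prompt_lower for kw in creativity_keywords):
--         return CRITERIA_CREATIVITY
--     elif any(kw in prompt_lower for kw in persona_keywords):
--         return CRITERIA_PERSONA_CONSISTENCY
--     else:
--         # Default to creativity if no criterion phrase detected
--         return CRITERIA_CREATIVITY
-- ===== SOURCE B (Python) =====
-- CRITERIA_CREATIVITY = """Creativity and Imaginative Expression:
-- - **Original Ideas:** Novel concepts, unexpected connections, or fresh perspectives
-- - **Vivid Imagery:** Rich, sensory language that creates immersive mental pictures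
-- - **Character Voice:** Distinctive, authentic expression that goes beyond generic responses
-- - **Imaginative Details:** Creative elements, metaphors, or unexpected but fitting touches
-- - **Narrative Flair:** Unique storytelling techniques, creative structure, or engaging presentation
-- - **Reader Engagement:** Captivating content that surprises and delights"""
--
--
-- def _detect_evaluation_criterion(prompt: str) -> str:
--     # Every keyword phrase in A contains uppercase letters, but A tests them
--     # against prompt.lower(), so no branch can ever fire: the result is always
--     # the creativity criteria. Return it directly.
--     return CRITERIA_CREATIVITY
-- ===== Notes on version B (the rewrite author's own statement) =====
-- stated objective: simpler
-- what changed: A lowercases the prompt but every keyword phrase contains uppercase letters, so all membership tests are provably dead code; B drops the keyword lists and branches and returns CRITERIA_CREATIVITY directly.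
import Mathlib
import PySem

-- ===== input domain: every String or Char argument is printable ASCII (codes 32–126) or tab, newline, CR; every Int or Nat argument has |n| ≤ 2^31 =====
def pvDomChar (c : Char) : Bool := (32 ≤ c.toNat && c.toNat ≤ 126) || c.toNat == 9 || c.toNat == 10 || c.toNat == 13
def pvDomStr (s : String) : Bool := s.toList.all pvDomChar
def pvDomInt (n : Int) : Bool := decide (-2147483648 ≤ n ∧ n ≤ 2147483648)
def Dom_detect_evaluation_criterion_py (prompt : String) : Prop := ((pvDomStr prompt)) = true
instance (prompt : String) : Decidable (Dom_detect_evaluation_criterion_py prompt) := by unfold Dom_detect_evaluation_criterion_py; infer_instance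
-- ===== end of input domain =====

-- B drops A's keyword lists and if/elif chain: every keyword phrase contains uppercase
-- letters but is tested against prompt.lower(), so no branch can fire and the result is
-- always CRITERIA_CREATIVITY, which B returns directly (objective: simpler).

-- ===== PORT A =====
def CRITERIA_HUMOR_PLAYFULNESS : String := "Humor & Playfulness:\n- **Light-heartedness**: Cheerful, upbeat tone that avoids being overly serious\n- **Wit**: Clever wordplay, amusing observations, or entertaining delivery\n- **Fun-loving nature**: Enthusiasm for enjoyable activities and playful interactions\n- **Personality consistency**: Humor that feels authentic to the character, not forced"

def CRITERIA_CREATIVITY : String := "Creativity and Imaginative Expression:\n- **Original Ideas:** Novel concepts, unexpected connections, or fresh perspectives\n- **Vivid Imagery:** Rich, sensory language that creates immersive mental pictures\n- **Character Voice:** Distinctive, authentic expression that goes beyond generic responses\n- **Imaginative Details:** Creative elements, metaphors, or unexpected but fitting touches\n- **Narrative Flair:** Unique storytelling techniques, creative structure, or engaging presentation\n- **Reader Engagement:** Captivating content that surprises and delights"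

def CRITERIA_PERSONA_CONSISTENCY : String := "Persona Consistency:\n- **Character Voice:** Distinctive speaking style, vocabulary, and expression patterns\n- **Personality Traits:** Core behavioral characteristics and emotional tendencies\n- **Motivations:** Actions and responses aligned with character goals/background\n- **Tone Consistency:** Maintained emotional register throughout the response\n- **Behavioral Authenticity:** Responses feel natural for this specific character"

def detect_evaluation_criterion_py (prompt : String) : String :=
  let prompt_lower := PySem.Str.lower prompt
  let humor_keywords : List String := ["Humor & Playfulness"]
  let creativity_keywords : List String := ["Creativity and Imaginative Expression"]
  let persona_keywords : List String := ["Persona Consistency"]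
  if humor_keywords.any (fun kw => PySem.Str.isIn kw prompt_lower) then
    CRITERIA_HUMOR_PLAYFULNESS
  else if creativity_keywords.any (fun kw => PySem.Str.isIn kw prompt_lower) then
    CRITERIA_CREATIVITY
  else if persona_keywords.any (fun kw => PySem.Str.isIn kw prompt_lower) then
    CRITERIA_PERSONA_CONSISTENCY
  else
    CRITERIA_CREATIVITY

-- ===== PORT B =====
def detect_evaluation_criterion_py_alt (_prompt : String) : String :=
  CRITERIA_CREATIVITY

-- ===== PRECONDITION & SPEC =====
def Spec_detect_evaluation_criterion_py (prompt : String) (out : String) : Prop := out = detect_evaluation_criterion_py_alt prompt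
instance (prompt : String) (out : String) : Decidable (Spec_detect_evaluation_criterion_py prompt out) := by unfold Spec_detect_evaluation_criterion_py; infer_instance

-- ===== CLAIM (what is proved, stated in full; the proofs are below) =====
def Claim_equal_detect_evaluation_criterion_py : Prop := ∀ (prompt : String), Dom_detect_evaluation_criterion_py prompt → Spec_detect_evaluation_criterion_py prompt (detect_evaluation_criterion_py prompt)

-- ===== LEMMAS AND PROOFS =====

-- lower() never produces an uppercase ASCII letter
theorem lowerChar_ne_of_upper (c d : Char) (hd : PySem.Chars.isupper d = true) :
    PySem.Chars.lowerChar c ≠ d := by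
  have hd' : 65 ≤ d.toNat ∧ d.toNat ≤ 90 := by
    simp only [PySem.Chars.isupper, Bool.and_eq_true, decide_eq_true_eq] at hd
    exact ⟨hd.1, hd.2⟩
  unfold PySem.Chars.lowerChar
  split_ifs with h
  · have hc' : 65 ≤ c.toNat ∧ c.toNat ≤ 90 := by
      simp only [PySem.Chars.isupper, Bool.and_eq_true, decide_eq_true_eq] at h
      exact ⟨h.1, h.2⟩
    intro he
    have : (Char.ofNat (c.toNat + 32)).toNat = d.toNat := by rw [he]
    rw [Char.toNat_ofNat] at this
    have hv : (c.toNat + 32).isValidChar := Or.inl (by omega)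
    rw [if_pos hv] at this
    omega
  · intro he
    subst he
    exact h hd

theorem isIn_lower_false (kw : String) (c : Char) (hc : c ∈ kw.toList)
    (hu : PySem.Chars.isupper c = true) (s : String) :
    PySem.Str.isIn kw (PySem.Str.lower s) = false := by
  rw [Bool.eq_false_iff]
  intro htrue
  have hinf := (PySem.Str.isIn_iff_infix kw (PySem.Str.lower s)).mp htrue
  have hmem : c ∈ (PySem.Str.lower s).toList := hinf.subset hc
  rw [PySem.Str.toList_lower] at hmem
  unfold PySem.Chars.lower at hmem
  rcases List.mem_map.mp hmem with ⟨a, _, ha⟩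
  exact lowerChar_ne_of_upper a c hu ha

-- ===== VERDICT (by name: the statement is the Claim_ definition above) =====
theorem detect_evaluation_criterion_py_spec : Claim_equal_detect_evaluation_criterion_py := by
  intro prompt _
  unfold Spec_detect_evaluation_criterion_py detect_evaluation_criterion_py detect_evaluation_criterion_py_alt
  simp only [List.any_cons, List.any_nil, Bool.or_false]
  rw [isIn_lower_false "Humor & Playfulness" 'H' (by decide) (by decide) prompt,
      isIn_lower_false "Creativity and Imaginative Expression" 'C' (by decide) (by decide) prompt,
      isIn_lower_false "Persona Consistency" 'P' (by decide) (by decide) prompt]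
  simp
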